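-- pv_equiv track=rewrite | github.com/namhooh/frontiermind-app | python-backend/services/ontology/relationship_detector.py | _build_category_mapping
-- ===== SOURCE A (Python) =====
-- from typing import List, Dict, Any, Optional, Tuple
--
-- def _build_category_mapping(
--
--     clauses: List[Dict[str, Any]]
-- ) -> Dict[str, List[Dict[str, Any]]]:
--     """Build mapping from category code to clause list."""
--     category_to_clauses = {}
--
--     for clause in clauses:
--         category_code = clause.get('clause_category_code')
--         if category_code:
--             if category_code not in category_to_clauses:
--                 category_to_clauses[category_code] = []
--             category_to_clauses[category_code].append(clause)
--
--     return category_to_clauses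
-- ===== SOURCE B (Python) =====
-- def _build_category_mapping(clauses):
--     """Build mapping from category code to clause list (two-pass: collect codes, then filter per code)."""
--     codes = []
--     for clause in clauses:
--         code = clause.get('clause_category_code')
--         if code and code not in codes:
--             codes.append(code)
--     return {code: [c for c in clauses
--                    if c.get('clause_category_code') == code]
--             for code in codes}
-- ===== Notes on version B (the rewrite author's own statement) =====
-- stated objective: alternative
-- what changed: Replaces the single-pass dict-building loop (create-empty-then-append per clause) with a two-pass strategy: first collect the distinct truthy category codes in first-appearance order, then build the dict by one filter comprehension per code.
import Mathlib
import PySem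

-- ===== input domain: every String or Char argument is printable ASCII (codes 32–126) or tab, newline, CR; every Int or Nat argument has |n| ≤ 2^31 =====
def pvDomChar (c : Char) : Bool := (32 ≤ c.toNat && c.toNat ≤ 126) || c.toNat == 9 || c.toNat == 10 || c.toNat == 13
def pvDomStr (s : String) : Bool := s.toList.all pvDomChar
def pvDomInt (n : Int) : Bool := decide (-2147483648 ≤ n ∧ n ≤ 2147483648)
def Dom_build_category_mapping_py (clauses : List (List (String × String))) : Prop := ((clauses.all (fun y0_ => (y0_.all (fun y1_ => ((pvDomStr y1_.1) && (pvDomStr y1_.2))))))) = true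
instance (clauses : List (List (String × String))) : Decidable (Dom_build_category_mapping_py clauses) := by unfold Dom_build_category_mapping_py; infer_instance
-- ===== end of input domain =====

-- B replaces A's single-pass dict grouping with a two-pass code-collect + per-code filter; same result, alternative decomposition.


-- ===== PORT A =====
-- clause.get('clause_category_code'): first-match lookup in the clause dict
def pvLook (clause : List (String × String)) : Option String :=
  (PySem.Dict.mk clause).get? "clause_category_code"

def build_category_mapping_py (clauses : List (List (String × String))) : List (String × List (List (String × String))) :=
  (clauses.foldl
    (fun d clause =>
      match pvLook clause with
      | none => d
      | some code =>
        if code = "" then d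
        else
          let d1 := if d.contains code then d else d.insert code []
          d1.modify code [] (fun l => l ++ [clause]))
    PySem.Dict.empty).items

-- ===== PORT B =====
def build_category_mapping_py_alt (clauses : List (List (String × String))) : List (String × List (List (String × String))) :=
  let codes := clauses.foldl
    (fun acc clause =>
      match pvLook clause with
      | none => acc
      | some code => if code ≠ "" ∧ code ∉ acc then acc ++ [code] else acc)
    []
  codes.map (fun code => (code, clauses.filter (fun c => pvLook c == some code)))

-- ===== PRECONDITION & SPEC =====
def Spec_build_category_mapping_py (clauses : List (List (String × String))) (out : List (String × List (List (String × String)))) : Prop := out = build_category_mapping_py_alt clauses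
instance (clauses : List (List (String × String))) (out : List (String × List (List (String × String)))) : Decidable (Spec_build_category_mapping_py clauses out) := by unfold Spec_build_category_mapping_py; infer_instance

-- ===== CLAIM (what is proved, stated in full; the proofs are below) =====
def Claim_equal_build_category_mapping_py : Prop := ∀ (clauses : List (List (String × String))), Dom_build_category_mapping_py clauses → Spec_build_category_mapping_py clauses (build_category_mapping_py clauses)

-- ===== LEMMAS AND PROOFS =====

-- A's fold step / B's code-collecting fold step, named for the proofs
def pvStepA (d : PySem.Dict String (List (List (String × String)))) (clause : List (String × String)) :
    PySem.Dict String (List (List (String × String))) :=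
  match pvLook clause with
  | none => d
  | some code =>
    if code = "" then d
    else
      let d1 := if d.contains code then d else d.insert code []
      d1.modify code [] (fun l => l ++ [clause])

def pvStepC (acc : List String) (clause : List (String × String)) : List String :=
  match pvLook clause with
  | none => acc
  | some code => if code ≠ "" ∧ code ∉ acc then acc ++ [code] else acc

-- the joint loop invariant, proved by induction from the right
theorem pvInv (p : List (List (String × String))) :
    (p.foldl pvStepA PySem.Dict.empty).items
      = (p.foldl pvStepC []).map (fun k => (k, p.filter (fun c => pvLook c == some k)))
    ∧ (∀ k, k ∈ p.foldl pvStepC [] ↔ (k ≠ "" ∧ ∃ c ∈ p, pvLook c = some k))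
    ∧ (p.foldl pvStepC []).Nodup := by
  induction p using List.reverseRecOn with
  | nil => simp [PySem.Dict.empty]
  | append_singleton p c ih =>
    obtain ⟨hitems, hmem, hnd⟩ := ih
    rw [List.foldl_append, List.foldl_append]
    simp only [List.foldl_cons, List.foldl_nil]
    set A := p.foldl pvStepA PySem.Dict.empty with hA
    set K := p.foldl pvStepC [] with hKdef
    have hK : A.keys = K := by
      simp [PySem.Dict.keys, hitems, List.map_map, Function.comp_def]
    have hcont : ∀ code, A.contains code = true ↔ code ∈ K := by
      intro code; rw [PySem.Dict.contains_iff_mem_keys, hK]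
    have hfilt : ∀ k, (p ++ [c]).filter (fun x => pvLook x == some k)
        = p.filter (fun x => pvLook x == some k) ++ (if pvLook c == some k then [c] else []) := by
      intro k; rw [List.filter_append]; congr 1
      cases h : pvLook c == some k <;> simp [List.filter, h]
    cases hc : pvLook c with
    | none =>
      have hsA : pvStepA A c = A := by simp [pvStepA, hc]
      have hsC : pvStepC K c = K := by simp [pvStepC, hc]
      rw [hsA, hsC]
      refine ⟨?_, ?_, hnd⟩
      · rw [hitems]; apply List.map_congr_left; intro k hk
        rw [hfilt k]; simp [hc]
      · intro k; rw [hmem k]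
        constructor
        · rintro ⟨h1, x, hx, h2⟩; exact ⟨h1, x, List.mem_append_left _ hx, h2⟩
        · rintro ⟨h1, x, hx, h2⟩
          rcases List.mem_append.1 hx with hx | hx
          · exact ⟨h1, x, hx, h2⟩
          · simp at hx; subst hx; rw [hc] at h2; cases h2
    | some code =>
      by_cases hcode : code = ""
      · subst hcode
        have hsA : pvStepA A c = A := by simp [pvStepA, hc]
        have hsC : pvStepC K c = K := by simp [pvStepC, hc]
        rw [hsA, hsC]
        refine ⟨?_, ?_, hnd⟩
        · rw [hitems]; apply List.map_congr_left; intro k hk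
          have hk' : k ≠ "" := ((hmem k).1 hk).1
          rw [hfilt k]; simp [hc, hk'.symm]
        · intro k; rw [hmem k]
          constructor
          · rintro ⟨h1, x, hx, h2⟩; exact ⟨h1, x, List.mem_append_left _ hx, h2⟩
          · rintro ⟨h1, x, hx, h2⟩
            rcases List.mem_append.1 hx with hx | hx
            · exact ⟨h1, x, hx, h2⟩
            · simp at hx; subst hx; rw [hc] at h2; cases h2; exact absurd rfl h1
      · -- code ≠ ""  (nonempty code)
        by_cases hin : code ∈ K
        · -- existing key
          have hcontT : A.contains code = true := (hcont code).2 hin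
          have hstepC : pvStepC K c = K := by
            simp [pvStepC, hc, hin]
          have hgetD : A.getD code [] = p.filter (fun x => pvLook x == some code) := by
            apply PySem.Dict.getD_of_mem_items
            · rw [hitems]; exact List.mem_map.2 ⟨code, hin, rfl⟩
            · rw [hK]; exact hnd
          have hstepA : pvStepA A c = A.insert code (p.filter (fun x => pvLook x == some code) ++ [c]) := by
            simp [pvStepA, hc, hcode, hcontT, PySem.Dict.modify, hgetD]
          refine ⟨?_, ?_, by rw [hstepC]; exact hnd⟩
          · rw [hstepA, hstepC, PySem.Dict.items_insert_of_contains _ _ hcontT, hitems, List.map_map]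
            apply List.map_congr_left; intro k hk
            by_cases hkc : k = code
            · subst hkc; simp [hfilt k, hc]
            · have h1 : (k == code) = false := by simp [hkc]
              simp only [Function.comp, h1]
              rw [hfilt k, hc]
              simp [Ne.symm hkc]
          · intro k; rw [hstepC, hmem k]
            constructor
            · rintro ⟨h1, x, hx, h2⟩; exact ⟨h1, x, List.mem_append_left _ hx, h2⟩
            · rintro ⟨h1, x, hx, h2⟩
              rcases List.mem_append.1 hx with hx | hx
              · exact ⟨h1, x, hx, h2⟩
              · simp at hx; subst hx; rw [hc] at h2; cases h2
                exact (hmem code).1 hin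
        · -- new key
          have hcontF : A.contains code = false := by
            cases h : A.contains code
            · rfl
            · exact absurd ((hcont code).1 h) hin
          have hstepC : pvStepC K c = K ++ [code] := by
            simp [pvStepC, hc, hcode, hin]
          have hfiltp : p.filter (fun x => pvLook x == some code) = [] := by
            rw [List.filter_eq_nil_iff]
            intro x hx hbeq
            have : pvLook x = some code := by simpa using hbeq
            exact hin ((hmem code).2 ⟨hcode, x, hx, this⟩)
          have hd1 : (A.insert code ([] : List (List (String × String)))).getD code [] = [] := by
            simp [PySem.Dict.getD_insert_self]
          have hcont1 : (A.insert code ([] : List (List (String × String)))).contains code = true :=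
            PySem.Dict.contains_insert_self _ _ _
          have hstepA : pvStepA A c = (A.insert code []).insert code ([] ++ [c]) := by
            simp [pvStepA, hc, hcode, hcontF, PySem.Dict.modify, hd1]
          refine ⟨?_, ?_, ?_⟩
          · rw [hstepA, hstepC, PySem.Dict.items_insert_of_contains _ _ hcont1,
                PySem.Dict.items_insert_of_not_contains _ _ hcontF, hitems]
            rw [List.map_append, List.map_map, List.map_append]
            congr 1
            · apply List.map_congr_left; intro k hk
              have hkc : k ≠ code := fun h => hin (h ▸ hk)
              have h1 : (k == code) = false := by simp [hkc]
              simp only [Function.comp, h1, Bool.false_eq_true]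
              rw [hfilt k, hc]
              simp [Ne.symm hkc]
            · simp [hc, hfiltp]
          · intro k
            rw [hstepC, List.mem_append, hmem k]
            constructor
            · rintro (⟨h1, x, hx, h2⟩ | hk)
              · exact ⟨h1, x, List.mem_append_left _ hx, h2⟩
              · simp at hk; subst hk
                exact ⟨hcode, c, List.mem_append_right _ (by simp), hc⟩
            · rintro ⟨h1, x, hx, h2⟩
              rcases List.mem_append.1 hx with hx | hx
              · exact Or.inl ⟨h1, x, hx, h2⟩
              · simp at hx; subst hx; rw [hc] at h2; cases h2; exact Or.inr (by simp)
          · rw [hstepC]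
            simp [List.nodup_append, hnd]
            exact fun a ha h => hin (h ▸ ha)

-- ===== VERDICT (by name: the statement is the Claim_ definition above) =====
theorem build_category_mapping_py_spec : Claim_equal_build_category_mapping_py := by
  intro clauses _
  show _ = _
  have h := (pvInv clauses).1
  simpa [build_category_mapping_py, build_category_mapping_py_alt, pvStepA, pvStepC] using h
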